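-- pv_equiv track=rewrite | github.com/duonghh/NT538-GiaiThuatXuLySongSongVaPhanBo | Lab1-BaiLam/lab1-ch1.py | calc_fib_batch
-- ===== SOURCE A (Python) =====
-- def calc_fib_batch(batch, mod):
--     output = []
--     for val in batch:
--         a, b = 0, 1
--         # Dùng fast doubling dựa trên bit của val
--         for bit in bin(val)[2:]:
--             temp1 = (a * ((2 * b - a) % mod)) % mod
--             temp2 = (a * a + b * b) % mod
--             if bit == '1':
--                 a, b = temp2, (temp1 + temp2) % mod
--             else:
--                 a, b = temp1, temp2
--         output.append(a)
--     return output
-- ===== SOURCE B (Python) =====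
-- def calc_fib_batch(batch, mod):
--     def fib_mod(val):
--         # 2x2 matrix power of [[1,1],[1,0]] over the bits of bin(val)[2:]
--         p, q, r, s = 1, 0, 0, 1
--         for bit in bin(val)[2:]:
--             p, q, r, s = (p*p + q*r) % mod, (p*q + q*s) % mod, (r*p + s*r) % mod, (r*q + s*s) % mod
--             if bit == '1':
--                 p, q, r, s = (p + q) % mod, p, (r + s) % mod, r
--         return q
--     return [fib_mod(val) for val in batch]
-- ===== Notes on version B (the rewrite author's own statement) =====
-- stated objective: alternative
-- what changed: Each Fibonacci value is computed by 2x2 matrix exponentiation of [[1,1],[1,0]] over the same MSB-first bit string bin(val)[2:], maintaining four matrix entries mod `mod`, instead of A's two-variable fast-doubling recurrence; the batch is built with a comprehension over a helper instead of an append loop. Pre_ excludes mod == 0, where Python's % raises ZeroDivisionError in both programs (vacuously also for an empty batch, where both return []).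
-- outside the precondition, e.g. on calc_fib_batch([], 0): A returns [], B returns []
import Mathlib
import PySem

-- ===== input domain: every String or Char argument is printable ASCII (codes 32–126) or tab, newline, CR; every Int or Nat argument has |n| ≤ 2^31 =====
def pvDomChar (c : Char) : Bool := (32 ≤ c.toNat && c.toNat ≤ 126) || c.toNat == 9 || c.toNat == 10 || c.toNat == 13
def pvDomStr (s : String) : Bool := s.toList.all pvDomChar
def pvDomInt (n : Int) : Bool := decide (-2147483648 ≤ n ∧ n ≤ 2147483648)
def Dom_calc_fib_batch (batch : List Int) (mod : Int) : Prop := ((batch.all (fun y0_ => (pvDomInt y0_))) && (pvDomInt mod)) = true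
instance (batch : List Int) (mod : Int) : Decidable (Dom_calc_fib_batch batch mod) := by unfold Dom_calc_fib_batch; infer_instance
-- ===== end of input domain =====

-- B replaces fast doubling by 2x2 matrix exponentiation over the same bit string (objective: alternative algorithm, same cost).

-- ===== PORT A =====
-- one iteration of A's inner loop: fast-doubling step on (a, b), branching on the char
def fibStepA (m : Int) (st : Int × Int) (c : Char) : Int × Int :=
  let temp1 := PySem.Int.mod (st.1 * (PySem.Int.mod (2 * st.2 - st.1) m)) m
  let temp2 := PySem.Int.mod (st.1 * st.1 + st.2 * st.2) m
  if c = '1' then (temp2, PySem.Int.mod (temp1 + temp2) m) else (temp1, temp2)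

def calc_fib_batch (batch : List Int) (mod : Int) : List Int :=
  batch.foldl (fun output val =>
    output ++ [((PySem.List.slice (PySem.Int.pyBin val).toList (some 2) none).foldl (fibStepA mod) (0, 1)).1]) []

-- ===== PORT B =====
-- one iteration of B's inner loop: square the matrix (p,q,r,s), multiply by [[1,1],[1,0]] on a '1' char
def matStepB (m : Int) (st : Int × Int × Int × Int) (c : Char) : Int × Int × Int × Int :=
  let p2 := PySem.Int.mod (st.1 * st.1 + st.2.1 * st.2.2.1) m
  let q2 := PySem.Int.mod (st.1 * st.2.1 + st.2.1 * st.2.2.2) m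
  let r2 := PySem.Int.mod (st.2.2.1 * st.1 + st.2.2.2 * st.2.2.1) m
  let s2 := PySem.Int.mod (st.2.2.1 * st.2.1 + st.2.2.2 * st.2.2.2) m
  if c = '1' then (PySem.Int.mod (p2 + q2) m, p2, PySem.Int.mod (r2 + s2) m, r2) else (p2, q2, r2, s2)

def fib_mod_alt (m : Int) (val : Int) : Int :=
  ((PySem.List.slice (PySem.Int.pyBin val).toList (some 2) none).foldl (matStepB m) (1, 0, 0, 1)).2.1

def calc_fib_batch_alt (batch : List Int) (mod : Int) : List Int :=
  batch.map (fib_mod_alt mod)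

-- ===== PRECONDITION & SPEC =====
-- Pre_ excludes mod = 0, where Python's % raises ZeroDivisionError in both programs (for an empty batch no % runs and both return []; that trivial case is excluded too).
def Pre_calc_fib_batch (batch : List Int) (mod : Int) : Prop := mod ≠ 0
instance (batch : List Int) (mod : Int) : Decidable (Pre_calc_fib_batch batch mod) := by unfold Pre_calc_fib_batch; infer_instance
def pvWitness_calc_fib_batch : List Int × Int := ([10, 0, -7], 5)

def Spec_calc_fib_batch (batch : List Int) (mod : Int) (out : List Int) : Prop := out = calc_fib_batch_alt batch mod
instance (batch : List Int) (mod : Int) (out : List Int) : Decidable (Spec_calc_fib_batch batch mod out) := by unfold Spec_calc_fib_batch; infer_instance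

-- ===== CLAIM (what is proved, stated in full; the proofs are below) =====
def Claim_equal_calc_fib_batch : Prop := ∀ (batch : List Int) (mod : Int), Dom_calc_fib_batch batch mod → Pre_calc_fib_batch batch mod → Spec_calc_fib_batch batch mod (calc_fib_batch batch mod)

-- ===== LEMMAS AND PROOFS =====

-- Python's  x % m  is congruent to x modulo m
theorem pymod_modEq (x m : Int) : Int.ModEq m (PySem.Int.mod x m) x := by
  rw [Int.modEq_iff_dvd]
  exact ⟨PySem.Int.floordiv x m,
    by have h := PySem.Int.floordiv_mul_add_mod x m
       have := mul_comm m (PySem.Int.floordiv x m); linarith⟩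

-- congruent values have equal Python remainders (m ≠ 0)
theorem pymod_eq_of_modEq {m : Int} (hm : m ≠ 0) {x y : Int} (h : Int.ModEq m x y) :
    PySem.Int.mod x m = PySem.Int.mod y m := by
  have h' : Int.ModEq m (PySem.Int.mod x m) (PySem.Int.mod y m) :=
    (pymod_modEq x m).trans (h.trans (pymod_modEq y m).symm)
  obtain ⟨k, hk⟩ := h'.dvd
  rcases lt_or_gt_of_ne hm with hneg | hpos
  · have b1 := PySem.Int.mod_neg_bounds (a := x) hneg
    have b2 := PySem.Int.mod_neg_bounds (a := y) hneg
    have hk1 : k < 1 := by nlinarith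
    have hk2 : -1 < k := by nlinarith
    have : k = 0 := by omega
    subst this; simp at hk; linarith
  · have b1l := PySem.Int.mod_nonneg (a := x) hpos
    have b1r := PySem.Int.mod_lt (a := x) hpos
    have b2l := PySem.Int.mod_nonneg (a := y) hpos
    have b2r := PySem.Int.mod_lt (a := y) hpos
    have hk1 : k < 1 := by nlinarith
    have hk2 : -1 < k := by nlinarith
    have : k = 0 := by omega
    subst this; simp at hk; linarith

theorem pymod_idem {m : Int} (hm : m ≠ 0) (x : Int) :
    PySem.Int.mod (PySem.Int.mod x m) m = PySem.Int.mod x m :=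
  pymod_eq_of_modEq hm (pymod_modEq x m)

-- loop invariant: A's fast-doubling state (a,b) vs B's matrix (p,q,r,s):
-- p ≡ b, q ≡ r ≡ a, s ≡ b - a (mod m), and a,q are equal or both reduced.
theorem loop_eq {m : Int} (hm : m ≠ 0) :
    ∀ (cs : List Char) (a b p q r s : Int),
      Int.ModEq m p b → Int.ModEq m q a → Int.ModEq m r a → Int.ModEq m s (b - a) →
      (a = q ∨ (PySem.Int.mod a m = a ∧ PySem.Int.mod q m = q)) →
      (cs.foldl (fibStepA m) (a, b)).1 = (cs.foldl (matStepB m) (p, q, r, s)).2.1 := by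
  intro cs
  induction cs with
  | nil =>
      intro a b p q r s _ hq _ _ hex
      rcases hex with h | ⟨ha, hqr⟩
      · simpa using h
      · simp only [List.foldl]
        rw [← ha, ← hqr]
        exact pymod_eq_of_modEq hm hq.symm
  | cons c cs ih =>
      intro a b p q r s hp hq hr hs _
      have hmod : ∀ x : Int, Int.ModEq m (PySem.Int.mod x m) x := fun x => pymod_modEq x m
      -- congruences for A's two temporaries
      have hA1 : Int.ModEq m (PySem.Int.mod (a * (PySem.Int.mod (2 * b - a) m)) m) (a * (2 * b - a)) :=
        (hmod _).trans ((Int.ModEq.refl a).mul (hmod _))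
      have hA2 : Int.ModEq m (PySem.Int.mod (a * a + b * b) m) (a * a + b * b) := hmod _
      -- congruences for B's squared matrix
      have hp2 : Int.ModEq m (PySem.Int.mod (p * p + q * r) m) (a * a + b * b) :=
        (hmod _).trans ((show b * b + a * a = a * a + b * b by ring) ▸ ((hp.mul hp).add (hq.mul hr)))
      have hq2 : Int.ModEq m (PySem.Int.mod (p * q + q * s) m) (a * (2 * b - a)) :=
        (hmod _).trans ((show b * a + a * (b - a) = a * (2 * b - a) by ring) ▸ ((hp.mul hq).add (hq.mul hs)))
      have hr2 : Int.ModEq m (PySem.Int.mod (r * p + s * r) m) (a * (2 * b - a)) :=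
        (hmod _).trans ((show a * b + (b - a) * a = a * (2 * b - a) by ring) ▸ ((hr.mul hp).add (hs.mul hr)))
      have hs2 : Int.ModEq m (PySem.Int.mod (r * q + s * s) m) (a * a + b * b - a * (2 * b - a)) :=
        (hmod _).trans ((show a * a + (b - a) * (b - a) = a * a + b * b - a * (2 * b - a) by ring) ▸ ((hr.mul hq).add (hs.mul hs)))
      simp only [List.foldl, fibStepA, matStepB]
      by_cases hc : c = '1' <;> simp only [hc, if_true, if_false] <;> apply ih
      -- '1' branch: A's new state (t2, (t1+t2) % m); B's R² · [[1,1],[1,0]]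
      · exact (hmod _).trans (((show a * a + b * b + a * (2 * b - a) =
          a * (2 * b - a) + (a * a + b * b) by ring) ▸ (hp2.add hq2)).trans ((hmod _).trans (hA1.add hA2)).symm)
      · exact hp2.trans hA2.symm
      · exact (hmod _).trans (((show a * (2 * b - a) + (a * a + b * b - a * (2 * b - a)) =
          a * a + b * b by ring) ▸ (hr2.add hs2)).trans hA2.symm)
      · exact hr2.trans ((show a * (2 * b - a) + (a * a + b * b) - (a * a + b * b) =
          a * (2 * b - a) by ring) ▸ (((hmod _).trans (hA1.add hA2)).sub hA2)).symm
      · exact Or.inr ⟨pymod_idem hm _, pymod_idem hm _⟩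
      -- '0' branch: A's new state (t1, t2); B's R²
      · exact hp2.trans hA2.symm
      · exact hq2.trans hA1.symm
      · exact hr2.trans hA1.symm
      · exact hs2.trans (hA2.sub hA1).symm
      · exact Or.inr ⟨pymod_idem hm _, pymod_idem hm _⟩

theorem per_element {m : Int} (hm : m ≠ 0) (val : Int) :
    ((PySem.List.slice (PySem.Int.pyBin val).toList (some 2) none).foldl (fibStepA m) (0, 1)).1 =
      fib_mod_alt m val := by
  unfold fib_mod_alt
  exact loop_eq hm _ 0 1 1 0 0 1 (Int.ModEq.refl 1) (Int.ModEq.refl 0) (Int.ModEq.refl 0) (by norm_num [Int.ModEq]) (Or.inl rfl)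

-- ===== VERDICT (by name: the statement is the Claim_ definition above) =====
theorem calc_fib_batch_spec : Claim_equal_calc_fib_batch := by
  intro batch m hdom hpre
  clear hdom
  unfold Spec_calc_fib_batch calc_fib_batch calc_fib_batch_alt
  induction batch using List.reverseRecOn with
  | nil => rfl
  | append_singleton xs x ih =>
      have hpre' : Pre_calc_fib_batch xs m := hpre
      rw [List.foldl_append, List.map_append, ← ih hpre']
      simp only [List.foldl, List.map]
      rw [per_element hpre]
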